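-- pv_equiv track=rewrite | github.com/minhphan03/CodeSignal | The Core/Loop Tunnel/additionWithoutCarrying.py | solution
-- ===== SOURCE A (Python) =====
-- def solution(param1, param2):
--     if param1 > param2:
--         i = len(str(param1))
--         param2 = format(param2, '0{}d'.format(i))
--         param1 = str(param1)
--     else:
--         i = len(str(param2))
--         param1 = format(param1, '0{}d'.format(i))
--         param2 = str(param2)
--     return int(''.join([str((int(x) + int(y))%10) for x, y in zip(param1, param2)]))
-- ===== SOURCE B (Python) =====
-- def solution(param1, param2):
--     result = 0
--     place = 1
--     while param1 > 0 or param2 > 0: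
--         result += ((param1 % 10 + param2 % 10) % 10) * place
--         param1 //= 10
--         param2 //= 10
--         place *= 10
--     return result
-- ===== Notes on version B (the rewrite author's own statement) =====
-- stated objective: idiomatic
-- what changed: Replaces A's string formatting, zero-padding, zip of character digits and int-of-joined-string with a plain arithmetic loop extracting digits via % 10 and // 10 and rebuilding the result with a place accumulator; Pre_ excludes negative inputs, on which A raises ValueError (int('-')).
import Mathlib
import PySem

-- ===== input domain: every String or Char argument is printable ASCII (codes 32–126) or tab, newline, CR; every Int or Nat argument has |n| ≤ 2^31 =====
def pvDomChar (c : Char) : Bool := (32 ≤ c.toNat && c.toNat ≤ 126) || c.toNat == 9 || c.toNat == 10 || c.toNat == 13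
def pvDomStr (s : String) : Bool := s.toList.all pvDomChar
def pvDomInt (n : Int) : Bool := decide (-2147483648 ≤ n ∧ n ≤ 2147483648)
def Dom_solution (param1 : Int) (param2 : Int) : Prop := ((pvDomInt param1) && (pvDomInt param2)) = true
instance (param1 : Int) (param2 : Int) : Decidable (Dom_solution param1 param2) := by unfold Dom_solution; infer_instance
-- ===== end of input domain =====

-- B replaces A's string formatting / zero padding / digit zip by a plain arithmetic loop
-- (digits via % 10 and // 10, place accumulator); return values agree on all nonnegative inputs.

-- ===== PORT A =====
-- format(n, '0id') : left-pad with '0' to length i (exact for nonnegative n, the only inputs Pre_ admits)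
def padChars (i : Nat) (s : List Char) : List Char := List.replicate (i - s.length) '0' ++ s
-- int(x) for a single character x : exact when x is a decimal digit, which is the only
-- case A reaches on Pre_ (on '-', Python raises ValueError; those inputs are outside Pre_)
def chInt (c : Char) : Int := (c.toNat : Int) - 48

def solution (param1 : Int) (param2 : Int) : Int :=
  let pr :=
    if param1 > param2 then
      let i := (PySem.Int.toChars param1).length
      (PySem.Int.toChars param1, padChars i (PySem.Int.toChars param2))
    else
      let i := (PySem.Int.toChars param2).length
      (padChars i (PySem.Int.toChars param1), PySem.Int.toChars param2)
  -- int(''.join([str((int(x)+int(y))%10) …])) : each joined piece is one digit character, so the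
  -- int of the joined digit string is the base-10 left fold of those digits (exact on Pre_)
  ((pr.1.zip pr.2).map (fun xy => (chInt xy.1 + chInt xy.2) % 10)).foldl
    (fun acc d => acc * 10 + d) 0

-- ===== PORT B =====
-- the while loop of Source B; the fuel argument only makes the recursion structural (100 ≥ the
-- number of decimal digits of any input in Dom, so the loop always ends by its own condition there)
def altLoop : Nat → Int → Int → Int → Int → Int
  | 0, _, _, _, result => result
  | fuel+1, p1, p2, place, result =>
    if p1 > 0 ∨ p2 > 0 then
      altLoop fuel (PySem.Int.floordiv p1 10) (PySem.Int.floordiv p2 10) (place * 10)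
        (result + ((PySem.Int.mod p1 10 + PySem.Int.mod p2 10) % 10) * place)
    else result

def solution_alt (param1 : Int) (param2 : Int) : Int :=
  altLoop 100 param1 param2 1 0

-- ===== PRECONDITION & SPEC =====
-- Pre_ excludes negative inputs: there Python A raises ValueError (int('-') on the sign character).
def Pre_solution (param1 : Int) (param2 : Int) : Prop := 0 ≤ param1 ∧ 0 ≤ param2
instance (param1 : Int) (param2 : Int) : Decidable (Pre_solution param1 param2) := by
  unfold Pre_solution; infer_instance
def pvWitness_solution : Int × Int := (456, 1734)

def Spec_solution (param1 : Int) (param2 : Int) (out : Int) : Prop := out = solution_alt param1 param2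
instance (param1 : Int) (param2 : Int) (out : Int) : Decidable (Spec_solution param1 param2 out) := by
  unfold Spec_solution; infer_instance

-- ===== CLAIM (what is proved, stated in full; the proofs are below) =====
def Claim_equal_solution : Prop := ∀ (param1 : Int) (param2 : Int), Dom_solution param1 param2 → Pre_solution param1 param2 → Spec_solution param1 param2 (solution param1 param2)

-- ===== LEMMAS AND PROOFS =====

-- big-endian decimal digits of n (so Nat.toDigits 10 n = digitsOf n mapped through digitChar)
def digitsOf : Nat → List Nat
  | n => if n < 10 then [n] else digitsOf (n / 10) ++ [n % 10]
  decreasing_by exact Nat.div_lt_self (by omega) (by omega)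

def padN (k : Nat) (l : List Nat) : List Nat := List.replicate (k - l.length) 0 ++ l

-- the common value both ports compute: digit-wise sum without carrying
def noCarry : Nat → Nat → Nat
  | m, n =>
    if h : m = 0 ∧ n = 0 then 0
    else noCarry (m / 10) (n / 10) * 10 + (m % 10 + n % 10) % 10
  termination_by m n => m + n
  decreasing_by
    have h2 := Nat.div_le_self n 10
    have h3 := Nat.div_le_self m 10
    by_cases hm : m = 0
    · have := Nat.div_lt_self (by omega : 0 < n) (by omega : 1 < 10); omega
    · have := Nat.div_lt_self (by omega : 0 < m) (by omega : 1 < 10); omega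

theorem noCarry_zero : noCarry 0 0 = 0 := by
  rw [noCarry.eq_def]; simp

theorem noCarry_step (m n : Nat) :
    noCarry m n = noCarry (m / 10) (n / 10) * 10 + (m % 10 + n % 10) % 10 := by
  by_cases h : m = 0 ∧ n = 0
  · obtain ⟨hm, hn⟩ := h
    subst hm; subst hn
    simp [noCarry_zero]
  · conv_lhs => rw [noCarry.eq_def]
    simp [h]

theorem digitChar_toNat (d : Nat) (h : d < 10) : (Nat.digitChar d).toNat = d + 48 := by
  interval_cases d <;> rfl

theorem toDigits_eq_map (n : Nat) : Nat.toDigits 10 n = (digitsOf n).map Nat.digitChar := by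
  induction n using Nat.strong_induction_on with
  | _ n ih =>
    rw [digitsOf]
    by_cases h : n < 10
    · rw [Nat.toDigits_of_lt_base h, if_pos h, List.map_singleton]
    · rw [Nat.toDigits_eq_if (by omega : 1 < 10), if_neg h, if_neg h, List.map_append,
        ih (n / 10) (Nat.div_lt_self (by omega) (by omega)), List.map_singleton]

theorem digitsOf_len_pos (n : Nat) : 0 < (digitsOf n).length := by
  rw [digitsOf]; split_ifs <;> simp

theorem digitsOf_lt (n : Nat) : ∀ d ∈ digitsOf n, d < 10 := by
  induction n using Nat.strong_induction_on with
  | _ n ih =>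
    rw [digitsOf]
    split_ifs with h
    · simpa using h
    · intro d hd
      rcases List.mem_append.1 hd with hd | hd
      · exact ih (n / 10) (Nat.div_lt_self (by omega) (by omega)) d hd
      · simp at hd; omega

theorem digitsOf_len_le_iff (n k : Nat) (hk : 0 < k) :
    (digitsOf n).length ≤ k ↔ n < 10 ^ k := by
  have := Nat.length_toDigits_le_iff (b := 10) (n := n) (k := k) (by omega) hk
  rwa [toDigits_eq_map, List.length_map] at this

theorem digitsOf_len_mono {a b : Nat} (h : b ≤ a) :
    (digitsOf b).length ≤ (digitsOf a).length := by
  have hpos := digitsOf_len_pos a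
  have ha : a < 10 ^ (digitsOf a).length := (digitsOf_len_le_iff a _ hpos).1 le_rfl
  exact (digitsOf_len_le_iff b _ hpos).2 (lt_of_le_of_lt h ha)

theorem digitsOf_one_of_lt (n : Nat) (h : n < 10) : digitsOf n = [n] := by
  rw [digitsOf, if_pos h]

theorem padN_step (k : Nat) (hk : 1 ≤ k) (b : Nat) :
    padN (k + 1) (digitsOf b) = padN k (digitsOf (b / 10)) ++ [b % 10] := by
  by_cases h : b < 10
  · rw [digitsOf_one_of_lt b h, Nat.div_eq_of_lt h, digitsOf_one_of_lt 0 (by omega),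
      Nat.mod_eq_of_lt h]
    unfold padN
    simp only [List.length_singleton]
    have hrep : List.replicate (k + 1 - 1) (0 : Nat) = List.replicate (k - 1) 0 ++ [0] := by
      have h2 : k + 1 - 1 = (k - 1) + 1 := by omega
      rw [h2, List.replicate_succ']
    rw [hrep, List.append_assoc]
  · have hb : digitsOf b = digitsOf (b / 10) ++ [b % 10] := by
      rw [digitsOf.eq_def]
      simp [h]
    rw [hb]
    unfold padN
    rw [List.length_append, List.length_singleton, ← List.append_assoc]
    have hrep : k + 1 - ((digitsOf (b / 10)).length + 1) = k - (digitsOf (b / 10)).length := by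
      omega
    rw [hrep]

theorem digitsOf_div_len_le (a k : Nat) (hk : 1 ≤ k)
    (h : (digitsOf a).length ≤ k + 1) : (digitsOf (a / 10)).length ≤ k := by
  by_cases ha : a < 10
  · rw [Nat.div_eq_of_lt ha, digitsOf_one_of_lt 0 (by omega)]
    simpa using hk
  · rw [digitsOf, if_neg ha, List.length_append, List.length_singleton] at h
    omega

theorem padN_length (k : Nat) (l : List Nat) (h : l.length ≤ k) : (padN k l).length = k := by
  unfold padN
  rw [List.length_append, List.length_replicate]
  omega

-- the A-side fold over zipped padded digit lists computes noCarry
theorem fold_zip_eq (k : Nat) : ∀ (a b : Nat) (acc : Int),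
    (digitsOf a).length ≤ k → (digitsOf b).length ≤ k →
    ((padN k (digitsOf a)).zip (padN k (digitsOf b))).foldl
      (fun acc xy => acc * 10 + ((xy.1 : Int) + (xy.2 : Int)) % 10) acc
      = acc * 10 ^ k + (noCarry a b : Int) := by
  induction k with
  | zero => intro a b acc ha _; have := digitsOf_len_pos a; omega
  | succ k ih =>
    intro a b acc ha hb
    by_cases hk : k = 0
    · subst hk
      have ha' : a < 10 := by
        have := (digitsOf_len_le_iff a 1 (by omega)).1 ha; simpa using this
      have hb' : b < 10 := by
        have := (digitsOf_len_le_iff b 1 (by omega)).1 hb; simpa using this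
      rw [digitsOf_one_of_lt a ha', digitsOf_one_of_lt b hb']
      simp only [padN, List.length_singleton, Nat.sub_self, List.replicate_zero,
        List.nil_append, List.zip_cons_cons, List.zip_nil_right, List.foldl_cons,
        List.foldl_nil]
      rw [noCarry_step a b, Nat.div_eq_of_lt ha', Nat.div_eq_of_lt hb', noCarry_zero,
        Nat.mod_eq_of_lt ha', Nat.mod_eq_of_lt hb']
      push_cast
      ring_nf
    · have hk1 : 1 ≤ k := by omega
      have ha' := digitsOf_div_len_le a k hk1 ha
      have hb' := digitsOf_div_len_le b k hk1 hb
      rw [padN_step k hk1 a, padN_step k hk1 b,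
        List.zip_append (by rw [padN_length k _ ha', padN_length k _ hb']),
        List.foldl_append, ih (a / 10) (b / 10) acc ha' hb']
      simp only [List.zip_cons_cons, List.zip_nil_right, List.foldl_cons, List.foldl_nil]
      rw [noCarry_step a b]
      push_cast
      ring

-- on nonnegative input toChars is the digit list
theorem toChars_nonneg (p : Int) (h : 0 ≤ p) :
    PySem.Int.toChars p = (digitsOf p.toNat).map Nat.digitChar := by
  rw [PySem.Int.toChars, if_neg (by omega), toDigits_eq_map]

-- converting a padded digit-char list back to digits
theorem map_chInt_pair (a b : Nat) (k : Nat) :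
    ((padChars k ((digitsOf a).map Nat.digitChar)).zip
      (padChars k ((digitsOf b).map Nat.digitChar))).map
        (fun xy => (chInt xy.1 + chInt xy.2) % 10)
    = ((padN k (digitsOf a)).zip (padN k (digitsOf b))).map
        (fun xy => ((xy.1 : Int) + (xy.2 : Int)) % 10) := by
  have hpad : ∀ n : Nat, padChars k ((digitsOf n).map Nat.digitChar)
      = (padN k (digitsOf n)).map Nat.digitChar := by
    intro n
    unfold padChars padN
    rw [List.map_append, List.map_replicate, List.length_map]
    rfl
  rw [hpad a, hpad b, List.zip_map]
  rw [List.map_map]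
  apply List.map_congr_left
  intro xy hxy
  obtain ⟨h1, h2⟩ := List.of_mem_zip (a := xy.1) (b := xy.2) (by simpa using hxy)
  have hlt : ∀ (n d : Nat), d ∈ padN k (digitsOf n) → d < 10 := by
    intro n d hd
    rcases List.mem_append.1 hd with hd | hd
    · have := List.eq_of_mem_replicate hd; omega
    · exact digitsOf_lt n d hd
  have l1 := hlt a xy.1 h1
  have l2 := hlt b xy.2 h2
  simp only [Function.comp, chInt, Prod.map]
  rw [digitChar_toNat xy.1 l1, digitChar_toNat xy.2 l2]
  push_cast
  ring_nf

-- A computes noCarry of the two numbers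
theorem solution_eq_noCarry (p1 p2 : Int) (h1 : 0 ≤ p1) (h2 : 0 ≤ p2) :
    solution p1 p2 = (noCarry p1.toNat p2.toNat : Int) := by
  unfold solution
  set a := p1.toNat
  set b := p2.toNat
  rw [toChars_nonneg p1 h1, toChars_nonneg p2 h2]
  by_cases hgt : p1 > p2
  · have hba : b ≤ a := by omega
    simp only [if_pos hgt, List.length_map]
    set k := (digitsOf a).length with hkdef
    have ha : (digitsOf a).length ≤ k := le_rfl
    have hb : (digitsOf b).length ≤ k := digitsOf_len_mono hba
    have hsa : (digitsOf a).map Nat.digitChar = padChars k ((digitsOf a).map Nat.digitChar) := by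
      unfold padChars
      rw [List.length_map, ← hkdef, Nat.sub_self, List.replicate_zero, List.nil_append]
    rw [hsa, map_chInt_pair a b k]
    simp only [List.foldl_map]
    rw [fold_zip_eq k a b 0 ha hb]
    simp
  · have hab : a ≤ b := by omega
    simp only [if_neg hgt, List.length_map]
    set k := (digitsOf b).length with hkdef
    have hb : (digitsOf b).length ≤ k := le_rfl
    have ha : (digitsOf a).length ≤ k := digitsOf_len_mono hab
    have hsb : (digitsOf b).map Nat.digitChar = padChars k ((digitsOf b).map Nat.digitChar) := by
      unfold padChars
      rw [List.length_map, ← hkdef, Nat.sub_self, List.replicate_zero, List.nil_append]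
    rw [hsb, map_chInt_pair a b k]
    simp only [List.foldl_map]
    rw [fold_zip_eq k a b 0 ha hb]
    simp

theorem floordiv_natCast (m : Nat) : PySem.Int.floordiv (m : Int) 10 = ((m / 10 : Nat) : Int) := by
  simp [PySem.Int.floordiv, Int.fdiv_eq_ediv]

theorem mod_natCast (m : Nat) : PySem.Int.mod (m : Int) 10 = ((m % 10 : Nat) : Int) := by
  simp [PySem.Int.mod, Int.fmod_eq_emod]

-- B's loop computes noCarry, given enough fuel
theorem altLoop_eq (fuel : Nat) : ∀ (m n : Nat) (place result : Int),
    m < 10 ^ fuel → n < 10 ^ fuel →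
    altLoop fuel (m : Int) (n : Int) place result = result + place * (noCarry m n : Int) := by
  induction fuel with
  | zero =>
    intro m n place result hm hn
    simp only [pow_zero] at hm hn
    interval_cases m
    interval_cases n
    rw [altLoop, noCarry_zero]
    simp
  | succ fuel ih =>
    intro m n place result hm hn
    rw [altLoop]
    by_cases h0 : m = 0 ∧ n = 0
    · obtain ⟨hm0, hn0⟩ := h0
      subst hm0; subst hn0
      rw [if_neg (by simp), noCarry_zero]
      simp
    · rw [if_pos (by omega)]
      rw [floordiv_natCast m, floordiv_natCast n, mod_natCast m, mod_natCast n]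
      have hmod : ((m % 10 : Nat) : Int) + ((n % 10 : Nat) : Int) = ((m % 10 + n % 10 : Nat) : Int) := by push_cast; ring
      rw [hmod]
      have hcast : (((m % 10 + n % 10 : Nat) : Int)) % 10 = (((m % 10 + n % 10) % 10 : Nat) : Int) := by push_cast; ring
      rw [hcast]
      have hm' : m / 10 < 10 ^ fuel := Nat.div_lt_of_lt_mul (by rw [pow_succ'] at hm; exact hm)
      have hn' : n / 10 < 10 ^ fuel := Nat.div_lt_of_lt_mul (by rw [pow_succ'] at hn; exact hn)
      rw [ih (m / 10) (n / 10) (place * 10) _ hm' hn']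
      rw [noCarry_step m n]
      push_cast
      ring

theorem solution_alt_eq_noCarry (p1 p2 : Int) (h1 : 0 ≤ p1) (h2 : 0 ≤ p2)
    (hb1 : p1 ≤ 2147483648) (hb2 : p2 ≤ 2147483648) :
    solution_alt p1 p2 = (noCarry p1.toNat p2.toNat : Int) := by
  have hlt : (2147483648 : Nat) < 10 ^ 100 := by norm_num
  have hm : p1.toNat < 10 ^ 100 := by omega
  have hn : p2.toNat < 10 ^ 100 := by omega
  unfold solution_alt
  calc altLoop 100 p1 p2 1 0
      = altLoop 100 (p1.toNat : Int) (p2.toNat : Int) 1 0 := by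
        rw [Int.toNat_of_nonneg h1, Int.toNat_of_nonneg h2]
    _ = 0 + 1 * (noCarry p1.toNat p2.toNat : Int) := altLoop_eq 100 p1.toNat p2.toNat 1 0 hm hn
    _ = (noCarry p1.toNat p2.toNat : Int) := by ring

-- ===== VERDICT (by name: the statement is the Claim_ definition above) =====
theorem solution_spec : Claim_equal_solution := by
  intro p1 p2 hdom hpre
  obtain ⟨h1, h2⟩ := hpre
  unfold Dom_solution pvDomInt at hdom
  simp only [Bool.and_eq_true, decide_eq_true_eq] at hdom
  unfold Spec_solution
  rw [solution_eq_noCarry p1 p2 h1 h2,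
    solution_alt_eq_noCarry p1 p2 h1 h2 (by omega) (by omega)]
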